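-- pv_equiv track=rewrite | github.com/CountingMstar/CordingTest | baekjoon/my_14562.py | bfs
-- ===== SOURCE A (Python) =====
-- from collections import deque
--
-- def next_step(cur):
--     s, t = cur[0], cur[1]
--     a = (2*s,t+3)
--     b = (s+1,t)
--     return a, b
--
-- def bfs(node, count):
--     q = deque()
--     q.append(node)
--     final = False
--
--     while q:
--         count += 1
--         for i in range(len(q)):
--             tmp = q.popleft()
--             a, b = next_step(tmp)
--
--             if a[0] == a[1] or b[0] == b[1]:
--                 final = True
--                 final_count = count
--
--             q.append(a)
--             q.append(b)
--
--         if final == True: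
--             break
--
--     return final_count
-- ===== SOURCE B (Python) =====
-- def merge_unique(xs, ys):
--     # merge two sorted duplicate-free lists into their sorted duplicate-free union
--     out = []
--     i = j = 0
--     while i < len(xs) and j < len(ys):
--         if xs[i] < ys[j]:
--             out.append(xs[i]); i += 1
--         elif ys[j] < xs[i]:
--             out.append(ys[j]); j += 1
--         else:
--             out.append(xs[i]); i += 1; j += 1
--     out.extend(xs[i:])
--     out.extend(ys[j:])
--     return out
--
-- def bfs(node, count):
--     # Level-by-level BFS; the frontier is kept as a sorted list of DISTINCT states
--     # (both step maps are strictly monotone, so each child list stays sorted and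
--     # one linear merge deduplicates the next frontier).
--     frontier = [node]
--     depth = 0
--     while True:
--         depth += 1
--         nxt = merge_unique([(2 * s, t + 3) for s, t in frontier],
--                            [(s + 1, t) for s, t in frontier])
--         if any(s == t for s, t in nxt):
--             return count + depth
--         frontier = nxt
-- ===== Notes on version B (the rewrite author's own statement) =====
-- stated objective: alternative
-- what changed: B replaces A's deque holding one entry per root-to-node path (2^d entries at depth d) by a level-by-level BFS whose frontier is a sorted duplicate-free list of states, deduplicated by one linear merge of the two monotone child lists per level.
import Mathlib
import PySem

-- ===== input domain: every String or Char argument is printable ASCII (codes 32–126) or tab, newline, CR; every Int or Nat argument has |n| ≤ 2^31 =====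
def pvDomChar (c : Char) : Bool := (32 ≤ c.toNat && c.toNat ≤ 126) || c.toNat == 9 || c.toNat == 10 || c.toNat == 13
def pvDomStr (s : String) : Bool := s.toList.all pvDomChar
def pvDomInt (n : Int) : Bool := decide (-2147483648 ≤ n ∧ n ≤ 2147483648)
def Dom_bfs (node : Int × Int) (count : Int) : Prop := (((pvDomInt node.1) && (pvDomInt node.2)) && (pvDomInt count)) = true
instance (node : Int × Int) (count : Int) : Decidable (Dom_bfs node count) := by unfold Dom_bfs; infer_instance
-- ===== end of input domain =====

-- B replaces A's queue holding one entry per root-to-node path by a level-by-level BFS whose frontier is a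
-- sorted, duplicate-free list of states, deduplicated by one linear merge per level.
-- Both ports carry the same fuel guard (|s| + |t| + 16, which bounds the level at which an equal-coordinate
-- child exists whenever one exists at all); it only makes the loops total: whenever Python A returns, the
-- guard is not exhausted, and when both Pythons loop forever both ports return the same fuel-out value 0.

-- ===== PORT A =====
def nextStep (cur : Int × Int) : (Int × Int) × (Int × Int) :=
  ((2 * cur.1, cur.2 + 3), (cur.1 + 1, cur.2))

-- Python's 'deque' modelled as (front, back): its elements are front ++ back.reverse,
-- so popleft and append are O(1) (amortised), exactly collections.deque's cost.
-- This is the inner 'for i in range(len(q))' loop: n pops, threading (q, final, final_count).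
def bfsIter : Nat → List (Int × Int) × List (Int × Int) → Bool → Int → Int →
    (List (Int × Int) × List (Int × Int)) × Bool × Int
  | 0, q, final, fc, _ => (q, final, fc)
  | n + 1, (front, back), final, fc, count =>
    match front with
    | tmp :: f' =>
      let a := (nextStep tmp).1
      let b := (nextStep tmp).2
      let final' := if a.1 == a.2 || b.1 == b.2 then true else final
      let fc' := if a.1 == a.2 || b.1 == b.2 then count else fc
      bfsIter n (f', b :: a :: back) final' fc' count
    | [] =>
      match back.reverse with
      | [] => (([], []), final, fc)  -- popleft from empty deque: unreachable (n = len q)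
      | tmp :: f' =>
        let a := (nextStep tmp).1
        let b := (nextStep tmp).2
        let final' := if a.1 == a.2 || b.1 == b.2 then true else final
        let fc' := if a.1 == a.2 || b.1 == b.2 then count else fc
        bfsIter n (f', [b, a]) final' fc' count

-- the 'while q' loop; fuel-out returns the current final_count (never reached when Python A returns)
def bfsWhile : Nat → List (Int × Int) × List (Int × Int) → Int → Bool → Int → Int
  | 0, _, _, _, fc => fc
  | fuel + 1, (front, back), count, final, fc =>
    if front.isEmpty && back.isEmpty then fc  -- 'while q' fails: unreachable (q never empty)
    else
      let count' := count + 1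
      let r := bfsIter (front.length + back.length) (front, back) final fc count'
      if r.2.1 then r.2.2 else bfsWhile fuel r.1 count' r.2.1 r.2.2

def bfs (node : Int × Int) (count : Int) : Int :=
  bfsWhile (node.1.natAbs + node.2.natAbs + 16) ([node], []) count false 0

-- ===== PORT B =====
-- Python tuple comparison (s, t) < (s', t') — lexicographic
def lexLt (x y : Int × Int) : Bool := x.1 < y.1 || (x.1 == y.1 && x.2 < y.2)

-- merge_unique's while loop over indices i, j with its 'out' accumulator, plus the two final extends
def mergeUniqueGo : List (Int × Int) → List (Int × Int) → List (Int × Int) → List (Int × Int)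
  | out, [], ys => out.reverse ++ ys
  | out, x :: xs, [] => out.reverse ++ (x :: xs)
  | out, x :: xs, y :: ys =>
    if lexLt x y then mergeUniqueGo (x :: out) xs (y :: ys)
    else if lexLt y x then mergeUniqueGo (y :: out) (x :: xs) ys
    else mergeUniqueGo (x :: out) xs ys

def mergeUnique (xs ys : List (Int × Int)) : List (Int × Int) :=
  mergeUniqueGo [] xs ys

-- the 'while True' loop; fuel-out returns 0 (never reached when Python B returns)
def bfsAltLoop : Nat → List (Int × Int) → Int → Int → Int
  | 0, _, _, _ => 0
  | fuel + 1, frontier, depth, count =>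
    let depth' := depth + 1
    let nxt := mergeUnique (frontier.map (fun p => (2 * p.1, p.2 + 3)))
                           (frontier.map (fun p => (p.1 + 1, p.2)))
    if nxt.any (fun p => p.1 == p.2) then count + depth'
    else bfsAltLoop fuel nxt depth' count

def bfs_alt (node : Int × Int) (count : Int) : Int :=
  bfsAltLoop (node.1.natAbs + node.2.natAbs + 16) [node] 0 count

-- ===== PRECONDITION & SPEC =====
-- No Pre_: on inputs where Python A never finds an equal-coordinate child it loops forever (returns
-- nothing, and so does Python B); both ports then exhaust their fuel guard and return the same 0,
-- so the ports are equal on ALL inputs and the claim needs no precondition.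
def Spec_bfs (node : Int × Int) (count : Int) (out : Int) : Prop := out = bfs_alt node count
instance (node : Int × Int) (count : Int) (out : Int) : Decidable (Spec_bfs node count out) := by
  unfold Spec_bfs; infer_instance

-- ===== CLAIM (what is proved, stated in full; the proofs are below) =====
def Claim_equal_bfs : Prop := ∀ (node : Int × Int) (count : Int), Dom_bfs node count → Spec_bfs node count (bfs node count)

-- ===== LEMMAS AND PROOFS =====

-- A's inner loop re-played on the plain element list front ++ back.reverse (proof-only model of the deque)
def bfsIterL : Nat → List (Int × Int) → Bool → Int → Int → List (Int × Int) × Bool × Int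
  | 0, q, final, fc, _ => (q, final, fc)
  | n + 1, q, final, fc, count =>
    match q with
    | [] => (q, final, fc)
    | tmp :: rest =>
      let a := (nextStep tmp).1
      let b := (nextStep tmp).2
      let final' := if a.1 == a.2 || b.1 == b.2 then true else final
      let fc' := if a.1 == a.2 || b.1 == b.2 then count else fc
      bfsIterL n (rest ++ [a, b]) final' fc' count

def bfsWhileL : Nat → List (Int × Int) → Int → Bool → Int → Int
  | 0, _, _, _, fc => fc
  | fuel + 1, q, count, final, fc =>
    if q.isEmpty then fc
    else
      let count' := count + 1
      let r := bfsIterL q.length q final fc count'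
      if r.2.1 then r.2.2 else bfsWhileL fuel r.1 count' r.2.1 r.2.2

-- the children of one level, as A produces them in queue order
def childList (q : List (Int × Int)) : List (Int × Int) :=
  q.flatMap (fun p => [(2 * p.1, p.2 + 3), (p.1 + 1, p.2)])

-- 'some child of some element of q has equal coordinates'
def hasEq (q : List (Int × Int)) : Bool :=
  q.any (fun p => (2 * p.1 == p.2 + 3) || (p.1 + 1 == p.2))

theorem bfsIter_deque (n : Nat) : ∀ (front back : List (Int × Int)) (final : Bool) (fc count : Int),
    ((bfsIter n (front, back) final fc count).1.1 ++ (bfsIter n (front, back) final fc count).1.2.reverse,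
      (bfsIter n (front, back) final fc count).2) =
      bfsIterL n (front ++ back.reverse) final fc count := by
  induction n with
  | zero => intro front back final fc count; rfl
  | succ n ih =>
    intro front back final fc count
    match front with
    | tmp :: f' =>
      simp only [bfsIter, List.cons_append, bfsIterL]
      rw [ih]
      congr 1; simp
    | [] =>
      match hb : back.reverse with
      | [] =>
        have : back = [] := by simpa using congrArg List.reverse hb
        subst this
        rfl
      | tmp :: f' =>
        simp only [bfsIter, hb, List.nil_append, bfsIterL]
        rw [ih]
        congr 1

theorem bfsWhile_deque (fuel : Nat) : ∀ (front back : List (Int × Int)) (count : Int) (final : Bool) (fc : Int),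
    bfsWhile fuel (front, back) count final fc = bfsWhileL fuel (front ++ back.reverse) count final fc := by
  induction fuel with
  | zero => intro front back count final fc; rfl
  | succ fuel ih =>
    intro front back count final fc
    have hlen : front.length + back.length = (front ++ back.reverse).length := by simp
    have hemp : (front.isEmpty && back.isEmpty) = (front ++ back.reverse).isEmpty := by
      cases front <;> cases back <;> simp
    simp only [bfsWhile, bfsWhileL, hemp, hlen]
    have hit := bfsIter_deque (front ++ back.reverse).length front back final fc (count + 1)
    rcases hr : bfsIter (front ++ back.reverse).length (front, back) final fc (count + 1) with ⟨⟨f₁, b₁⟩, fl, v⟩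
    rw [hr] at hit
    rw [← hit]
    by_cases hfl : fl = true
    · simp [hfl]
    · simp only [Bool.not_eq_true] at hfl
      simp [hfl, ih]

theorem bfsIterL_spec (q : List (Int × Int)) : ∀ (rest : List (Int × Int)) (final : Bool) (fc count : Int),
    bfsIterL q.length (q ++ rest) final fc count =
      (rest ++ childList q, final || hasEq q, if hasEq q then count else fc) := by
  induction q with
  | nil => intro rest final fc count; simp [bfsIterL, childList, hasEq]
  | cons p q ih =>
    intro rest final fc count
    simp only [List.length_cons, List.cons_append, bfsIterL, nextStep]
    have hassoc : (q ++ rest) ++ [(2 * p.1, p.2 + 3), (p.1 + 1, p.2)] =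
        q ++ (rest ++ [(2 * p.1, p.2 + 3), (p.1 + 1, p.2)]) := by simp
    rw [hassoc, ih]
    simp only [childList, hasEq, List.flatMap_cons, List.any_cons]
    rcases Bool.eq_false_or_eq_true ((2 * p.1 == p.2 + 3) || (p.1 + 1 == p.2)) with hp | hp <;>
      rcases Bool.eq_false_or_eq_true (q.any fun p => ((2 * p.1 == p.2 + 3) || (p.1 + 1 == p.2))) with hq | hq <;>
      simp [hp, hq]

theorem mem_mergeUniqueGo (xs : List (Int × Int)) : ∀ (ys out : List (Int × Int)) (z : Int × Int),
    z ∈ mergeUniqueGo out xs ys ↔ z ∈ out ∨ z ∈ xs ∨ z ∈ ys := by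
  induction xs with
  | nil => intro ys out z; simp [mergeUniqueGo]
  | cons x xs ihx =>
    intro ys
    induction ys with
    | nil => intro out z; simp [mergeUniqueGo]
    | cons y ys ihy =>
      intro out z
      simp only [mergeUniqueGo]
      by_cases h1 : lexLt x y = true
      · simp only [h1, if_true, ihx (y :: ys), List.mem_cons]
        tauto
      · by_cases h2 : lexLt y x = true
        · simp only [h1, h2, Bool.false_eq_true, if_false, if_true, ihy, List.mem_cons]
          tauto
        · -- x and y are equal as tuples here
          have hxy : x = y := by
            rcases x with ⟨x1, x2⟩; rcases y with ⟨y1, y2⟩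
            simp only [lexLt] at h1 h2
            simp only [Bool.or_eq_true, Bool.and_eq_true, decide_eq_true_eq, beq_iff_eq,
              not_or, not_and] at h1 h2
            have : x1 = y1 := by omega
            subst this
            have : x2 = y2 := by omega
            simp [this]
          subst hxy
          have h1' : lexLt x x = false := by
            cases hlx : lexLt x x with
            | false => rfl
            | true => exact absurd hlx h1
          simp only [h1', Bool.false_eq_true, if_false, ihx ys, List.mem_cons]
          tauto

theorem mem_mergeUnique (xs ys : List (Int × Int)) (z : Int × Int) :
    z ∈ mergeUnique xs ys ↔ z ∈ xs ∨ z ∈ ys := by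
  simp [mergeUnique, mem_mergeUniqueGo]

-- membership in A's child list = membership in B's merged child lists
theorem mem_childList_iff (q : List (Int × Int)) (z : Int × Int) :
    z ∈ childList q ↔
      z ∈ mergeUnique (q.map (fun p => (2 * p.1, p.2 + 3))) (q.map (fun p => (p.1 + 1, p.2))) := by
  rw [mem_mergeUnique]
  simp only [childList, List.mem_flatMap, List.mem_map, List.mem_cons, List.not_mem_nil, or_false]
  constructor
  · rintro ⟨p, hp, h | h⟩
    · exact Or.inl ⟨p, hp, h.symm⟩
    · exact Or.inr ⟨p, hp, h.symm⟩
  · rintro (⟨p, hp, h⟩ | ⟨p, hp, h⟩)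
    · exact ⟨p, hp, Or.inl h.symm⟩
    · exact ⟨p, hp, Or.inr h.symm⟩

theorem hasEq_eq_any_childList (q : List (Int × Int)) :
    hasEq q = (childList q).any (fun p => p.1 == p.2) := by
  induction q with
  | nil => rfl
  | cons p q ih =>
    simp only [hasEq, childList, List.flatMap_cons, List.any_cons, List.any_append,
      List.any_nil, Bool.or_false] at ih ⊢
    rw [ih, Bool.or_assoc]

theorem bfsAltLoop_nil (n : Nat) : ∀ (d c : Int), bfsAltLoop n [] d c = 0 := by
  induction n with
  | zero => intro d c; rfl
  | succ n ih =>
    intro d c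
    simp only [bfsAltLoop, List.map_nil, mergeUnique, mergeUniqueGo, List.reverse_nil,
      List.append_nil, List.any_nil, Bool.false_eq_true, if_false]
    exact ih (d + 1) c

theorem main_loop (n : Nat) : ∀ (q f : List (Int × Int)) (c d : Int),
    (∀ p, p ∈ q ↔ p ∈ f) → bfsWhileL n q (c + d) false 0 = bfsAltLoop n f d c := by
  induction n with
  | zero => intro q f c d _; rfl
  | succ n ih =>
    intro q f c d h
    match hq : q with
    | [] =>
      have hf : f = [] := by
        cases f with
        | nil => rfl
        | cons x xs => exact absurd ((h x).mpr (by simp)) (by simp)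
      simp [bfsWhileL, hf, bfsAltLoop_nil]
    | p₀ :: q' =>
      have hiter := bfsIterL_spec (p₀ :: q') [] false 0 (c + d + 1)
      simp only [List.append_nil] at hiter
      have hmemc : ∀ x, x ∈ childList (p₀ :: q') ↔
          x ∈ mergeUnique (f.map (fun p => (2 * p.1, p.2 + 3))) (f.map (fun p => (p.1 + 1, p.2))) := by
        intro x
        rw [← mem_childList_iff]
        simp only [childList, List.mem_flatMap]
        constructor
        · rintro ⟨p, hp, hx⟩; exact ⟨p, (h p).mp hp, hx⟩
        · rintro ⟨p, hp, hx⟩; exact ⟨p, (h p).mpr hp, hx⟩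
      have hany : hasEq (p₀ :: q') =
          (mergeUnique (f.map (fun p => (2 * p.1, p.2 + 3))) (f.map (fun p => (p.1 + 1, p.2)))).any
            (fun p => p.1 == p.2) := by
        rw [hasEq_eq_any_childList]
        apply Bool.coe_iff_coe.mp
        simp only [List.any_eq_true]
        constructor
        · rintro ⟨x, hx, hpx⟩; exact ⟨x, (hmemc x).mp hx, hpx⟩
        · rintro ⟨x, hx, hpx⟩; exact ⟨x, (hmemc x).mpr hx, hpx⟩
      simp only [bfsWhileL, List.isEmpty_cons, Bool.false_eq_true, if_false, hiter, bfsAltLoop]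
      cases he : hasEq (p₀ :: q') with
      | true =>
        rw [he] at hany
        simp only [← hany, Bool.false_or, if_true]
        omega
      | false =>
        rw [he] at hany
        simp only [← hany, Bool.false_or, Bool.false_eq_true, if_false, List.nil_append]
        have hc : c + d + 1 = c + (d + 1) := by omega
        rw [hc]
        exact ih (childList (p₀ :: q'))
          (mergeUnique (f.map (fun p => (2 * p.1, p.2 + 3))) (f.map (fun p => (p.1 + 1, p.2))))
          c (d + 1) hmemc

-- ===== VERDICT (by name: the statement is the Claim_ definition above) =====
theorem bfs_spec : Claim_equal_bfs := by
  intro node count _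
  unfold Spec_bfs bfs bfs_alt
  rw [bfsWhile_deque]
  simp only [List.reverse_nil, List.append_nil]
  have := main_loop (node.1.natAbs + node.2.natAbs + 16) [node] [node] count 0 (fun p => Iff.rfl)
  simpa using this
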